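-- pv_equiv track=rewrite | github.com/johnlarkin1/advent-of-code | 2024/python/day09.py | sort_disk_map_pt1
-- ===== SOURCE A (Python) =====
-- FREE_SPACE_CHAR = "."
--
-- def sort_disk_map_pt1(disk_map: list[str]) -> list[str]:
--     end_of_disk_map_ptr = len(disk_map) - 1
--     for idx in range(len(disk_map)):
--         char = disk_map[idx]
--         if idx >= end_of_disk_map_ptr:
--             # We've already looked at the full string
--             break
--         if char == FREE_SPACE_CHAR:
--             while end_of_disk_map_ptr > idx:
--                 # ok if we find a digit, we need to move the pointer back
--                 # we should swap the free space with the digit and move the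
--                 # free space back to the back
--                 if disk_map[end_of_disk_map_ptr].isdigit():
--                     disk_map[end_of_disk_map_ptr], disk_map[idx] = (
--                         disk_map[idx],
--                         disk_map[end_of_disk_map_ptr],
--                     )
--                     end_of_disk_map_ptr -= 1
--                     break
--                 end_of_disk_map_ptr -= 1
--         else:
--             continue
--     return disk_map
-- ===== SOURCE B (Python) =====
-- FREE_SPACE_CHAR = "."
--
--
-- def sort_disk_map_pt1(disk_map: list[str]) -> list[str]:
--     # Gather hole indices (ascending) and digit indices (taken rightmost-first),
--     # then pair them up and swap until the pointers would cross.
--     holes = [i for i in range(len(disk_map)) if disk_map[i] == FREE_SPACE_CHAR]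
--     digits = [i for i in range(len(disk_map)) if disk_map[i].isdigit()]
--     for left, right in zip(holes, reversed(digits)):
--         if left >= right:
--             break
--         disk_map[left], disk_map[right] = disk_map[right], disk_map[left]
--     return disk_map
-- ===== Notes on version B (the rewrite author's own statement) =====
-- stated objective: simpler
-- what changed: Replaces A's interleaved forward scan with a stateful backward inner scan by two simple gather passes (hole indices ascending, digit indices rightmost-first) followed by one zip-and-swap pairing pass that stops when the indices cross.
import Mathlib
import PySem

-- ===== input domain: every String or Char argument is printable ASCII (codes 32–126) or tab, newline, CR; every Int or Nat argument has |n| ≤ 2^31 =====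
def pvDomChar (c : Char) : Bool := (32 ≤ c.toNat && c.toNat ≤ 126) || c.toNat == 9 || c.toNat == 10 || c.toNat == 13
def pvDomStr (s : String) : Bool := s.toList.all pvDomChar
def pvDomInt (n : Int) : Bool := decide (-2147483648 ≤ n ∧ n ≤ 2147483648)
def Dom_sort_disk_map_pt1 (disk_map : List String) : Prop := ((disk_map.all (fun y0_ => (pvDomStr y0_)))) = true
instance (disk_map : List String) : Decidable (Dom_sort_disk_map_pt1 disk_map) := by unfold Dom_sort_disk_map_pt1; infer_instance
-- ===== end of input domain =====

-- B replaces A's interleaved forward/backward two-pointer scan by two gather passes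
-- (hole indices ascending, digit indices reversed) plus one pairing-and-swap pass:
-- a simpler decomposition of the same compaction. Both Pythons mutate disk_map in
-- place and return it; the equivalence proved here is about the returned value.


-- ===== PORT A =====

-- shared helper: dm[i], dm[j] = dm[j], dm[i] (both Pythons swap two in-range cells)
def pvSwap (dm : List String) (i j : Nat) : List String :=
  (dm.set j (dm.getD i "")).set i (dm.getD j "")

-- A's inner `while end_of_disk_map_ptr > idx` loop: scan backwards for a digit,
-- swap and break if found; returns the updated list and pointer.
def pvAInner (dm : List String) (idx ptr : Nat) : List String × Nat :=
  if _h : idx < ptr then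
    if PySem.Str.strIsdigit (dm.getD ptr "") then (pvSwap dm idx ptr, ptr - 1)
    else pvAInner dm idx (ptr - 1)
  else (dm, ptr)
termination_by ptr
decreasing_by omega

-- A's outer `for idx in range(len(disk_map))` loop (break when idx >= ptr).
-- All indices stay in range (0 ≤ idx < ptr < n on every access), so getD is exact.
def pvAOuter (dm : List String) (ptr idx n : Nat) : List String :=
  if _h : idx < n then
    if ptr ≤ idx then dm
    else if dm.getD idx "" == "." then
      let r := pvAInner dm idx ptr
      pvAOuter r.1 r.2 (idx + 1) n
    else pvAOuter dm ptr (idx + 1) n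
  else dm
termination_by n - idx
decreasing_by all_goals omega

def sort_disk_map_pt1 (disk_map : List String) : List String :=
  pvAOuter disk_map (disk_map.length - 1) 0 disk_map.length

-- ===== PORT B =====

-- the `for left, right in zip(holes, reversed(digits))` loop with its break
def pvBLoop (pairs : List (Nat × Nat)) (dm : List String) : List String :=
  match pairs with
  | [] => dm
  | (l, r) :: rest => if r ≤ l then dm else pvBLoop rest (pvSwap dm l r)

def sort_disk_map_pt1_alt (disk_map : List String) : List String :=
  let holes := (List.range disk_map.length).filter (fun i => disk_map.getD i "" == ".")
  let digits := (List.range disk_map.length).filter (fun i => PySem.Str.strIsdigit (disk_map.getD i ""))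
  pvBLoop (holes.zip digits.reverse) disk_map

-- ===== PRECONDITION & SPEC =====
def Spec_sort_disk_map_pt1 (disk_map : List String) (out : List String) : Prop := out = sort_disk_map_pt1_alt disk_map
instance (disk_map : List String) (out : List String) : Decidable (Spec_sort_disk_map_pt1 disk_map out) := by unfold Spec_sort_disk_map_pt1; infer_instance

-- ===== CLAIM (what is proved, stated in full; the proofs are below) =====
def Claim_equal_sort_disk_map_pt1 : Prop := ∀ (disk_map : List String), Dom_sort_disk_map_pt1 disk_map → Spec_sort_disk_map_pt1 disk_map (sort_disk_map_pt1 disk_map)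

-- ===== LEMMAS AND PROOFS =====

-- the hole indices of dm that are ≥ a, ascending
def pvH (dm : List String) (a : Nat) : List Nat :=
  (List.range' a (dm.length - a)).filter (fun i => dm.getD i "" == ".")

-- the digit indices of dm that are ≤ p, descending
def pvD (dm : List String) (p : Nat) : List Nat :=
  ((List.range (p + 1)).filter (fun i => PySem.Str.strIsdigit (dm.getD i ""))).reverse

lemma pvSwap_length (dm : List String) (i j : Nat) : (pvSwap dm i j).length = dm.length := by
  simp [pvSwap]

lemma pvSwap_getD_ne (dm : List String) (i j k : Nat) (hik : k ≠ i) (hjk : k ≠ j) :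
    (pvSwap dm i j).getD k "" = dm.getD k "" := by
  simp [pvSwap, List.getD_eq_getElem?_getD, hik.symm, hjk.symm]

lemma pvSwap_getD_left (dm : List String) (i j : Nat) (hi : i < dm.length) :
    (pvSwap dm i j).getD i "" = dm.getD j "" := by
  simp [pvSwap, List.getD_eq_getElem?_getD, hi]

lemma pvSwap_getD_right (dm : List String) (i j : Nat) (hj : j < dm.length) :
    (pvSwap dm i j).getD j "" = dm.getD i "" := by
  by_cases h : i = j
  · subst h; simp [pvSwap, List.getD_eq_getElem?_getD, hj]
  · simp [pvSwap, List.getD_eq_getElem?_getD, hj, h]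

lemma pvD_mem_le {dm : List String} {p x : Nat} (hx : x ∈ pvD dm p) : x ≤ p := by
  simp only [pvD, List.mem_reverse, List.mem_filter, List.mem_range] at hx
  omega

lemma pvH_mem_ge {dm : List String} {a x : Nat} (hx : x ∈ pvH dm a) : a ≤ x := by
  simp only [pvH, List.mem_filter, List.mem_range'] at hx
  omega

lemma pvD_cons_of_digit {dm : List String} {p : Nat} (hp : 1 ≤ p)
    (hd : PySem.Str.strIsdigit (dm.getD p "") = true) :
    pvD dm p = p :: pvD dm (p - 1) := by
  have h1 : p - 1 + 1 = p := by omega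
  rw [pvD, pvD, h1, List.range_succ, List.filter_append]
  simp only [List.filter_cons, List.filter_nil, if_pos hd]
  simp

lemma pvD_eq_of_not_digit {dm : List String} {p : Nat} (hp : 1 ≤ p)
    (hd : ¬ PySem.Str.strIsdigit (dm.getD p "") = true) :
    pvD dm p = pvD dm (p - 1) := by
  have h1 : p - 1 + 1 = p := by omega
  rw [pvD, pvD, h1, List.range_succ, List.filter_append]
  simp only [List.filter_cons, List.filter_nil, if_neg hd]
  simp

lemma pvH_cons_of_hole {dm : List String} {a : Nat} (ha : a < dm.length)
    (hh : (dm.getD a "" == ".") = true) :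
    pvH dm a = a :: pvH dm (a + 1) := by
  have h1 : dm.length - a = (dm.length - (a + 1)) + 1 := by omega
  have hh' : dm[a]?.getD "" = "." := by simpa using hh
  rw [pvH, h1, List.range'_succ, List.filter_cons]
  simp [List.getD_eq_getElem?_getD, hh', pvH]

lemma pvH_eq_of_not_hole {dm : List String} {a : Nat} (hh : ¬ (dm.getD a "" == ".") = true) :
    pvH dm a = pvH dm (a + 1) := by
  by_cases ha : a < dm.length
  · have h1 : dm.length - a = (dm.length - (a + 1)) + 1 := by omega
    have hh' : ¬ dm[a]?.getD "" = "." := by simpa using hh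
    rw [pvH, h1, List.range'_succ, List.filter_cons]
    simp [List.getD_eq_getElem?_getD, hh', pvH]
  · have h0 : dm.length - a = 0 := by omega
    have h1 : dm.length - (a + 1) = 0 := by omega
    simp [pvH, h0, h1]

-- characterisation of A's inner backward scan in terms of pvD
lemma pvAInner_spec (ptr : Nat) : ∀ (dm : List String) (idx : Nat), idx < ptr → ptr < dm.length →
    (∃ R, idx < R ∧ R ≤ ptr ∧ pvD dm ptr = R :: pvD dm (R - 1) ∧
      pvAInner dm idx ptr = (pvSwap dm idx R, R - 1))
    ∨ ((∀ x ∈ pvD dm ptr, x ≤ idx) ∧ pvAInner dm idx ptr = (dm, idx)) := by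
  induction ptr using Nat.strong_induction_on with
  | _ ptr ih =>
    intro dm idx hlt hptr
    rw [pvAInner]
    rw [dif_pos hlt]
    by_cases hd : PySem.Str.strIsdigit (dm.getD ptr "") = true
    · left
      exact ⟨ptr, hlt, le_refl _, pvD_cons_of_digit (by omega) hd, by rw [if_pos hd]⟩
    · rw [if_neg hd]
      have hDeq : pvD dm ptr = pvD dm (ptr - 1) := pvD_eq_of_not_digit (by omega) hd
      by_cases hlt' : idx < ptr - 1
      · rcases ih (ptr - 1) (by omega) dm idx hlt' (by omega) with ⟨R, h1, h2, h3, h4⟩ | ⟨h1, h2⟩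
        · exact Or.inl ⟨R, h1, by omega, by rw [hDeq, h3], h4⟩
        · exact Or.inr ⟨by rw [hDeq]; exact h1, h2⟩
      · -- ptr - 1 ≤ idx, i.e. ptr - 1 = idx : the scan stops
        right
        constructor
        · intro x hx
          have := pvD_mem_le (p := ptr - 1) (by rw [← hDeq]; exact hx)
          omega
        · rw [pvAInner, dif_neg (by omega)]
          have : ptr - 1 = idx := by omega
          rw [this]

-- pvBLoop only sees the pairs before the first non-swapping one
lemma pvBLoop_eq_foldl (pairs : List (Nat × Nat)) (dm : List String) :
    pvBLoop pairs dm =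
      (pairs.takeWhile (fun p => decide (p.1 < p.2))).foldl
        (fun dm p => pvSwap dm p.1 p.2) dm := by
  induction pairs generalizing dm with
  | nil => rfl
  | cons hd tl ih =>
    obtain ⟨l, r⟩ := hd
    by_cases h : r ≤ l
    · rw [pvBLoop]
      simp [h, show ¬ l < r by omega]
    · rw [pvBLoop]
      simp only [if_neg h, List.takeWhile_cons]
      rw [if_pos (by simpa using by omega : (fun p : Nat × Nat => decide (p.1 < p.2)) (l, r) = true)]
      simp [ih]

lemma pvBLoop_congr {p1 p2 : List (Nat × Nat)} (dm : List String)
    (h : p1.takeWhile (fun p => decide (p.1 < p.2)) = p2.takeWhile (fun p => decide (p.1 < p.2))) :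
    pvBLoop p1 dm = pvBLoop p2 dm := by
  rw [pvBLoop_eq_foldl, pvBLoop_eq_foldl, h]

-- KEY: inserting the freshly created hole R (above every remaining digit) and the
-- freshly created digit a (below every remaining hole) does not change which pairs
-- are swapped before the pointers cross.
lemma pvKey (h1 : List Nat) : ∀ (d1 h2 d2 : List Nat) (a R : Nat), a < R →
    (∀ x ∈ h2, R < x) → (∀ y ∈ d2, y < a) → (∀ y ∈ d1, y < R) → (∀ x ∈ h1, a < x) →
    ((h1 ++ R :: h2).zip (d1 ++ a :: d2)).takeWhile (fun p => decide (p.1 < p.2))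
      = ((h1 ++ h2).zip (d1 ++ d2)).takeWhile (fun p => decide (p.1 < p.2)) := by
  induction h1 with
  | nil =>
    intro d1 h2 d2 a R haR hh2 hd2 hd1 _
    cases d1 with
    | nil =>
      simp only [List.nil_append]
      cases h2 with
      | nil =>
        cases d2 with
        | nil => simp [show ¬ R < a by omega]
        | cons y d2' => simp [List.zip_cons_cons, show ¬ R < a by omega]
      | cons x h2' =>
        have hxR : R < x := hh2 x (List.mem_cons_self)
        cases d2 with
        | nil => simp [List.zip_cons_cons, show ¬ R < a by omega]
        | cons y d2' =>
          have hya : y < a := hd2 y (List.mem_cons_self)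
          simp [List.zip_cons_cons,
            show ¬ R < a by omega, show ¬ x < y by omega]
    | cons y d1' =>
      have hyR : y < R := hd1 y (List.mem_cons_self)
      simp only [List.nil_append]
      cases h2 with
      | nil => simp [List.zip_cons_cons, show ¬ R < y by omega]
      | cons x h2' =>
        have hxR : R < x := hh2 x (List.mem_cons_self)
        simp [List.zip_cons_cons,
          show ¬ R < y by omega, show ¬ x < y by omega]
  | cons x h1' ih =>
    intro d1 h2 d2 a R haR hh2 hd2 hd1 hh1
    have hxa : a < x := hh1 x (List.mem_cons_self)
    cases d1 with
    | nil =>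
      simp only [List.nil_append, List.cons_append]
      cases d2 with
      | nil => simp [List.zip_cons_cons, show ¬ x < a by omega]
      | cons y d2' =>
        have hya : y < a := hd2 y (List.mem_cons_self)
        simp [List.zip_cons_cons,
          show ¬ x < a by omega, show ¬ x < y by omega]
    | cons y d1' =>
      simp only [List.cons_append, List.zip_cons_cons, List.takeWhile_cons]
      by_cases hxy : x < y
      · rw [if_pos (by simpa using hxy), if_pos (by simpa using hxy)]
        rw [ih d1' h2 d2 a R haR hh2 hd2
          (fun z hz => hd1 z (List.mem_cons_of_mem _ hz))
          (fun z hz => hh1 z (List.mem_cons_of_mem _ hz))]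
      · rw [if_neg (by simpa using hxy), if_neg (by simpa using hxy)]

lemma pvAOuter_stop (dm : List String) (ptr idx n : Nat) (h : ptr ≤ idx) :
    pvAOuter dm ptr idx n = dm := by
  rw [pvAOuter]
  by_cases hi : idx < n
  · rw [dif_pos hi, if_pos h]
  · rw [dif_neg hi]

-- B's pairing loop returns dm as soon as the leading pair has crossed
lemma pvBLoop_crossed (dm : List String) (hs ds : List Nat) (idx ptr : Nat)
    (hidx : ∀ x ∈ hs, idx ≤ x) (hptr : ∀ y ∈ ds, y ≤ ptr) (h : ptr ≤ idx) :
    pvBLoop (hs.zip ds) dm = dm := by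
  cases hs with
  | nil => rfl
  | cons h0 hs' =>
    cases ds with
    | nil => rfl
    | cons d0 ds' =>
      have h1 := hidx h0 List.mem_cons_self
      have h2 := hptr d0 List.mem_cons_self
      rw [List.zip_cons_cons, pvBLoop, if_pos (by omega)]

-- the swapped-list decompositions feeding pvKey
lemma pvH_swap_decomp (dm : List String) (idx R : Nat) (hiR : idx < R) (hR : R < dm.length)
    (hhole : (dm.getD idx "" == ".") = true)
    (hdig : PySem.Str.strIsdigit (dm.getD R "") = true) :
    pvH (pvSwap dm idx R) (idx + 1)
      = ((List.range' (idx + 1) (R - (idx + 1))).filter (fun i => dm.getD i "" == "."))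
        ++ R :: ((List.range' (R + 1) (dm.length - (R + 1))).filter (fun i => dm.getD i "" == "."))
      ∧ pvH dm (idx + 1)
      = ((List.range' (idx + 1) (R - (idx + 1))).filter (fun i => dm.getD i "" == "."))
        ++ ((List.range' (R + 1) (dm.length - (R + 1))).filter (fun i => dm.getD i "" == ".")) := by
  have hlen : (pvSwap dm idx R).length = dm.length := pvSwap_length dm idx R
  have hsplit : List.range' (idx + 1) (dm.length - (idx + 1))
      = List.range' (idx + 1) (R - (idx + 1)) ++ R :: List.range' (R + 1) (dm.length - (R + 1)) := by
    have h2 : dm.length - (idx + 1) = (R - (idx + 1)) + ((dm.length - (R + 1)) + 1) := by omega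
    have h3 : idx + 1 + (R - (idx + 1)) = R := by omega
    rw [h2, ← List.range'_append_1, h3, List.range'_succ]
  have hRhole : ((pvSwap dm idx R).getD R "" == ".") = true := by
    rw [pvSwap_getD_right dm idx R hR]; exact hhole
  have hRnothole : ¬ (dm.getD R "" == ".") = true := by
    intro hc
    rw [eq_of_beq hc] at hdig
    exact absurd hdig (by decide)
  have hagree1 : ∀ x ∈ List.range' (idx + 1) (R - (idx + 1)),
      ((pvSwap dm idx R).getD x "" == ".") = (dm.getD x "" == ".") := by
    intro x hx
    have := List.mem_range'.mp hx
    rw [pvSwap_getD_ne dm idx R x (by omega) (by omega)]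
  have hagree2 : ∀ x ∈ List.range' (R + 1) (dm.length - (R + 1)),
      ((pvSwap dm idx R).getD x "" == ".") = (dm.getD x "" == ".") := by
    intro x hx
    have := List.mem_range'.mp hx
    rw [pvSwap_getD_ne dm idx R x (by omega) (by omega)]
  constructor
  · rw [pvH, hlen, hsplit, List.filter_append, List.filter_cons]
    rw [List.filter_congr hagree1, List.filter_congr hagree2]
    simp [show (pvSwap dm idx R)[R]?.getD "" = "." by simpa using hRhole]
  · rw [pvH, hsplit, List.filter_append, List.filter_cons]
    simp [show ¬ dm[R]?.getD "" = "." by simpa using hRnothole]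

lemma pvD_swap_decomp (dm : List String) (idx R : Nat) (hiR : idx < R) (hR : R < dm.length)
    (hhole : (dm.getD idx "" == ".") = true)
    (hdig : PySem.Str.strIsdigit (dm.getD R "") = true) :
    pvD (pvSwap dm idx R) (R - 1)
      = ((List.range' (idx + 1) (R - (idx + 1))).filter
            (fun i => PySem.Str.strIsdigit (dm.getD i ""))).reverse
        ++ idx :: ((List.range idx).filter (fun i => PySem.Str.strIsdigit (dm.getD i ""))).reverse
      ∧ pvD dm (R - 1)
      = ((List.range' (idx + 1) (R - (idx + 1))).filter
            (fun i => PySem.Str.strIsdigit (dm.getD i ""))).reverse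
        ++ ((List.range idx).filter (fun i => PySem.Str.strIsdigit (dm.getD i ""))).reverse := by
  have hsplit : List.range (R - 1 + 1)
      = List.range idx ++ idx :: List.range' (idx + 1) (R - (idx + 1)) := by
    rw [List.range_eq_range']
    have h2 : R - 1 + 1 = idx + ((R - (idx + 1)) + 1) := by omega
    have h3 : 0 + idx = idx := by omega
    rw [h2, ← List.range'_append_1, h3, List.range'_succ, ← List.range_eq_range']
  have hidxdig : PySem.Str.strIsdigit ((pvSwap dm idx R).getD idx "") = true := by
    rw [pvSwap_getD_left dm idx R (by omega)]; exact hdig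
  have hidxnodig : ¬ PySem.Str.strIsdigit (dm.getD idx "") = true := by
    intro hc
    rw [eq_of_beq hhole] at hc
    exact absurd hc (by decide)
  have hagree1 : ∀ x ∈ List.range idx,
      PySem.Str.strIsdigit ((pvSwap dm idx R).getD x "") = PySem.Str.strIsdigit (dm.getD x "") := by
    intro x hx
    have := List.mem_range.mp hx
    rw [pvSwap_getD_ne dm idx R x (by omega) (by omega)]
  have hagree2 : ∀ x ∈ List.range' (idx + 1) (R - (idx + 1)),
      PySem.Str.strIsdigit ((pvSwap dm idx R).getD x "") = PySem.Str.strIsdigit (dm.getD x "") := by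
    intro x hx
    have := List.mem_range'.mp hx
    rw [pvSwap_getD_ne dm idx R x (by omega) (by omega)]
  constructor
  · rw [pvD, hsplit, List.filter_append, List.filter_cons]
    rw [List.filter_congr hagree1, List.filter_congr hagree2]
    simp [show PySem.Chars.strIsdigit ((pvSwap dm idx R)[idx]?.getD "").toList = true by simpa using hidxdig]
  · rw [pvD, hsplit, List.filter_append, List.filter_cons]
    simp [show PySem.Chars.strIsdigit (dm[idx]?.getD "").toList = false by simpa using hidxnodig]

-- MAIN INVARIANT: A's two-pointer loop from state (dm, ptr, idx) computes B's
-- pairing loop over the holes ≥ idx and the digits ≤ ptr of the current dm.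
lemma pvMain (k : Nat) : ∀ (dm : List String) (idx ptr : Nat),
    dm.length - idx ≤ k → ptr < dm.length →
    pvAOuter dm ptr idx dm.length = pvBLoop ((pvH dm idx).zip (pvD dm ptr)) dm := by
  induction k with
  | zero =>
    intro dm idx ptr hk _
    have hidx : ¬ idx < dm.length := by omega
    rw [pvAOuter, dif_neg hidx]
    have : pvH dm idx = [] := by
      simp [pvH, show dm.length - idx = 0 by omega]
    rw [this]
    rfl
  | succ k ih =>
    intro dm idx ptr hk hptr
    by_cases hidx : idx < dm.length
    case neg =>
      rw [pvAOuter, dif_neg hidx]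
      have : pvH dm idx = [] := by
        simp [pvH, show dm.length - idx = 0 by omega]
      rw [this]
      rfl
    case pos =>
      by_cases hip : ptr ≤ idx
      case pos =>
        rw [pvAOuter, dif_pos hidx, if_pos hip]
        exact (pvBLoop_crossed dm _ _ idx ptr (fun x hx => pvH_mem_ge hx)
          (fun y hy => pvD_mem_le hy) hip).symm
      case neg =>
        have hlt : idx < ptr := by omega
        by_cases hhole : (dm.getD idx "" == ".") = true
        case neg =>
          rw [pvAOuter, dif_pos hidx, if_neg hip, if_neg hhole]
          rw [pvH_eq_of_not_hole hhole]
          exact ih dm (idx + 1) ptr (by omega) hptr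
        case pos =>
          rw [pvAOuter, dif_pos hidx, if_neg hip, if_pos hhole]
          rcases pvAInner_spec ptr dm idx hlt hptr with
            ⟨R, hiR, hRp, hDeq, hInner⟩ | ⟨hall, hInner⟩
          case inr =>
            -- no digit strictly right of idx: both sides return dm unchanged
            rw [hInner]
            rw [pvAOuter_stop _ _ _ _ (by omega)]
            rw [pvH_cons_of_hole hidx hhole]
            cases hDp : pvD dm ptr with
            | nil => rw [List.zip_nil_right, pvBLoop]
            | cons d0 ds =>
              have hd0 : d0 ≤ idx := hall d0 (by rw [hDp]; exact List.mem_cons_self)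
              rw [List.zip_cons_cons, pvBLoop, if_pos hd0]
          case inl =>
            have hdig : PySem.Str.strIsdigit (dm.getD R "") = true := by
              have hmem : R ∈ pvD dm ptr := by rw [hDeq]; exact List.mem_cons_self
              simp only [pvD, List.mem_reverse, List.mem_filter] at hmem
              exact hmem.2
            have hRlen : R < dm.length := by omega
            rw [hInner]
            have hlen' : (pvSwap dm idx R).length = dm.length := pvSwap_length dm idx R
            have hih := ih (pvSwap dm idx R) (idx + 1) (R - 1)
              (by rw [hlen']; omega) (by rw [hlen']; omega)
            rw [hlen'] at hih
            rw [hih]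
            -- B side: peel the leading pair (idx, R)
            rw [pvH_cons_of_hole hidx hhole, hDeq, List.zip_cons_cons, pvBLoop,
              if_neg (by omega)]
            -- remaining pairs: apply the key lemma through the decompositions
            obtain ⟨hH1, hH2⟩ := pvH_swap_decomp dm idx R hiR hRlen hhole hdig
            obtain ⟨hD1, hD2⟩ := pvD_swap_decomp dm idx R hiR hRlen hhole hdig
            apply pvBLoop_congr
            rw [hH1, hH2, hD1, hD2]
            apply pvKey
            · omega
            · intro x hx
              have := List.mem_range'.mp (List.mem_filter.mp hx).1
              omega
            · intro y hy
              have := List.mem_range.mp (List.mem_filter.mp (List.mem_reverse.mp hy)).1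
              omega
            · intro y hy
              have := List.mem_range'.mp (List.mem_filter.mp (List.mem_reverse.mp hy)).1
              omega
            · intro x hx
              have := List.mem_range'.mp (List.mem_filter.mp hx).1
              omega

-- ===== VERDICT (by name: the statement is the Claim_ definition above) =====
theorem sort_disk_map_pt1_spec : Claim_equal_sort_disk_map_pt1 := by
  intro dm _
  show sort_disk_map_pt1 dm = sort_disk_map_pt1_alt dm
  simp only [sort_disk_map_pt1, sort_disk_map_pt1_alt]
  by_cases hn : dm.length = 0
  · rw [pvAOuter, dif_neg (by omega)]
    simp [hn, pvBLoop]
  · have hmain := pvMain dm.length dm 0 (dm.length - 1) (by omega) (by omega)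
    rw [hmain]
    have hH : pvH dm 0 = (List.range dm.length).filter (fun i => dm.getD i "" == ".") := by
      rw [pvH, Nat.sub_zero, List.range_eq_range']
    have hD : pvD dm (dm.length - 1)
        = ((List.range dm.length).filter (fun i => PySem.Str.strIsdigit (dm.getD i ""))).reverse := by
      rw [pvD, show dm.length - 1 + 1 = dm.length by omega]
    rw [hH, hD]
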